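-- pv_equiv track=rewrite | github.com/HaykSahakyan11/Machine_Learning_2 | practical_4/Beautiful binary string.py | beautiful_binary_string_1
-- ===== SOURCE A (Python) =====
-- def beautiful_binary_string_1(b):
--     counter, i = 0, 0
--     limit_i = len(b) - 2
--
--     while i < limit_i:
--         if b[i] == '0' and b[i + 1] == '1' and b[i + 2] == '0':
--             counter += 1
--             i += 2
--         i += 1
--     return counter
-- ===== SOURCE B (Python) =====
-- def beautiful_binary_string_1(b):
--     # str.replace performs the same non-overlapping left-to-right matching as the
--     # greedy scan; each "010" -> "01" substitution drops exactly one character.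
--     return len(b) - len(b.replace("010", "01"))
-- ===== Notes on version B (the rewrite author's own statement) =====
-- stated objective: simpler
-- what changed: Replaces the explicit index while-loop with skip-by-3 bookkeeping by a one-line length difference using str.replace, which performs the same greedy non-overlapping scan in C.
import Mathlib
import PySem

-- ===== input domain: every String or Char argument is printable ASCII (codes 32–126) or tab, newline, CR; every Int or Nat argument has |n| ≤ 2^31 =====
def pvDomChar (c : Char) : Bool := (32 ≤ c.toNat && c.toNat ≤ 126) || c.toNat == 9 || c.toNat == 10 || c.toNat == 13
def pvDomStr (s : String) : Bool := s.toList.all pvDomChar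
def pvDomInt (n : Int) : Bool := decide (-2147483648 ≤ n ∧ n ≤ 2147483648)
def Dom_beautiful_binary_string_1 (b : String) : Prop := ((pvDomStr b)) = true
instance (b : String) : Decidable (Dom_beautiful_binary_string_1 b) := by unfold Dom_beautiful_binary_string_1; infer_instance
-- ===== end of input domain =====

-- B computes the same greedy non-overlapping "010" count as A's index loop via a
-- one-line length difference using str.replace (objective: simpler).

-- ===== PORT A =====
-- the while loop of A: counter/i state, limit = len(b) - 2
def pvAGo (b : List Char) (limit : Int) (counter i : Int) : Int :=
  if h : i < limit then
    if PySem.List.pyGet? b i = some '0' ∧ PySem.List.pyGet? b (i + 1) = some '1'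
        ∧ PySem.List.pyGet? b (i + 2) = some '0' then
      pvAGo b limit (counter + 1) (i + 2 + 1)
    else
      pvAGo b limit counter (i + 1)
  else counter
termination_by (limit - i).toNat
decreasing_by all_goals omega

def beautiful_binary_string_1 (b : String) : Int :=
  pvAGo b.toList ((b.toList.length : Int) - 2) 0 0

-- ===== PORT B =====
def beautiful_binary_string_1_alt (b : String) : Int :=
  (PySem.Str.len b : Int) - (PySem.Str.len (PySem.Str.replace b "010" "01") : Int)

-- ===== PRECONDITION & SPEC =====
def Spec_beautiful_binary_string_1 (b : String) (out : Int) : Prop := out = beautiful_binary_string_1_alt b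
instance (b : String) (out : Int) : Decidable (Spec_beautiful_binary_string_1 b out) := by unfold Spec_beautiful_binary_string_1; infer_instance

-- ===== CLAIM (what is proved, stated in full; the proofs are below) =====
def Claim_equal_beautiful_binary_string_1 : Prop := ∀ (b : String), Dom_beautiful_binary_string_1 b → Spec_beautiful_binary_string_1 b (beautiful_binary_string_1 b)

-- ===== LEMMAS AND PROOFS =====

-- greedy non-overlapping "010" count of a character list
def pvCnt : List Char → Int
  | c1 :: c2 :: c3 :: t =>
    if c1 = '0' ∧ c2 = '1' ∧ c3 = '0' then pvCnt t + 1 else pvCnt (c2 :: c3 :: t)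
  | _ => 0

-- the pure result of replacing "010" by "01" left to right, non-overlapping
def pvRep : List Char → List Char
  | c1 :: c2 :: c3 :: t =>
    if c1 = '0' ∧ c2 = '1' ∧ c3 = '0' then '0' :: '1' :: pvRep t
    else c1 :: pvRep (c2 :: c3 :: t)
  | l => l

lemma pvCnt_short (l : List Char) (h : l.length ≤ 2) : pvCnt l = 0 := by
  match l with
  | [] => rfl
  | [_] => rfl
  | [_, _] => rfl
  | _ :: _ :: _ :: _ => simp at h

lemma pvRep_length (l : List Char) : ((pvRep l).length : Int) = (l.length : Int) - pvCnt l := by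
  fun_induction pvRep l with
  | case1 c1 c2 c3 t hcond ih => simp [pvCnt, hcond, ih]; omega
  | case2 c1 c2 c3 t hcond ih => simp [pvCnt, hcond, ih]; ring
  | case3 l hshape =>
    have hlen : l.length ≤ 2 := by
      match l with
      | [] => simp
      | [_] => simp
      | [_, _] => simp
      | c1 :: c2 :: c3 :: t => exact absurd rfl (hshape c1 c2 c3 t)
    rw [pvCnt_short l hlen]; simp

lemma go_eq (fuel : Nat) : ∀ (l acc : List Char), l.length ≤ fuel →
    PySem.Chars.replace.go ['0', '1', '0'] ['0', '1'] fuel l acc = acc.reverse ++ pvRep l := by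
  induction fuel with
  | zero =>
    intro l acc h
    have : l = [] := by cases l <;> simp_all
    subst this; simp [PySem.Chars.replace.go, pvRep]
  | succ n ih =>
    intro l acc h
    match l with
    | [] => simp [PySem.Chars.replace.go, pvRep]
    | c1 :: t1 =>
      rw [PySem.Chars.replace.go]
      by_cases hp : c1 = '0' ∧ ∃ t2, t1 = '1' :: '0' :: t2
      · obtain ⟨rfl, t2, rfl⟩ := hp
        have hpre : List.isPrefixOf ['0', '1', '0'] ('0' :: '1' :: '0' :: t2) = true := by
          simp [List.isPrefixOf]
        rw [if_pos hpre]
        have := ih t2 (['0', '1'].reverse ++ acc) (by simp at h ⊢; omega)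
        rw [show List.drop (['0','1','0'] : List Char).length ('0' :: '1' :: '0' :: t2) = t2 from rfl]
        rw [this]
        simp [pvRep]
      · have hpre : List.isPrefixOf ['0', '1', '0'] (c1 :: t1) = false := by
          rw [Bool.eq_false_iff]
          intro hpf
          rw [List.isPrefixOf_iff_prefix] at hpf
          obtain ⟨r, hr⟩ := hpf
          injection hr with e1 e2
          exact hp ⟨e1.symm, r, e2.symm⟩
        rw [if_neg (by simp [hpre])]
        have := ih t1 (c1 :: acc) (by simp at h; omega)
        rw [this]
        have hrep : pvRep (c1 :: t1) = c1 :: pvRep t1 := by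
          match t1 with
          | [] => rfl
          | [c2] => rfl
          | c2 :: c3 :: t3 =>
            rw [pvRep]
            rw [if_neg (by
              intro ⟨e1, e2, e3⟩
              exact hp ⟨e1, t3, by rw [e2, e3]⟩)]
        simp [hrep]

-- A's loop counts the greedy matches of the dropped suffix
lemma pvAGo_eq (b : List Char) : ∀ (k : Nat) (i c : Int), 0 ≤ i → ((b.length : Int) - i).toNat ≤ k →
    pvAGo b ((b.length : Int) - 2) c i = c + pvCnt (b.drop i.toNat) := by
  intro k
  induction k with
  | zero =>
    intro i c hi hk
    rw [pvAGo, dif_neg (by omega)]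
    rw [pvCnt_short _ (by simp; omega)]
    ring
  | succ n ih =>
    intro i c hi hk
    rw [pvAGo]
    by_cases hlt : i < (b.length : Int) - 2
    · rw [dif_pos hlt]
      obtain ⟨c1, c2, c3, rest, hdrop⟩ :
          ∃ c1 c2 c3 rest, b.drop i.toNat = c1 :: c2 :: c3 :: rest := by
        have h3 : 3 ≤ (b.drop i.toNat).length := by simp; omega
        match hm : b.drop i.toNat with
        | c1 :: c2 :: c3 :: rest => exact ⟨c1, c2, c3, rest, rfl⟩
        | [] | [_] | [_, _] => rw [hm] at h3; simp at h3
      have h0 : PySem.List.pyGet? b i = some c1 := by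
        rw [show i = ((i.toNat : Nat) : Int) from by omega, PySem.List.pyGet?_natCast]
        rw [show i.toNat = i.toNat + 0 from rfl, ← List.getElem?_drop, hdrop]; rfl
      have h1 : PySem.List.pyGet? b (i + 1) = some c2 := by
        rw [show i + 1 = ((i.toNat + 1 : Nat) : Int) from by push_cast; omega,
          PySem.List.pyGet?_natCast, ← List.getElem?_drop, hdrop]; rfl
      have h2 : PySem.List.pyGet? b (i + 2) = some c3 := by
        rw [show i + 2 = ((i.toNat + 2 : Nat) : Int) from by push_cast; omega,
          PySem.List.pyGet?_natCast, ← List.getElem?_drop, hdrop]; rfl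
      by_cases hc : c1 = '0' ∧ c2 = '1' ∧ c3 = '0'
      · obtain ⟨rfl, rfl, rfl⟩ := hc
        rw [if_pos ⟨h0, h1, h2⟩]
        have hdrop3 : b.drop (i + 2 + 1).toNat = rest := by
          rw [show (i + 2 + 1).toNat = i.toNat + 3 from by omega, ← List.drop_drop, hdrop]
          rfl
        rw [ih (i + 2 + 1) (c + 1) (by omega) (by omega), hdrop3, hdrop]
        rw [pvCnt, if_pos ⟨rfl, rfl, rfl⟩]
        ring
      · rw [if_neg (by
          rw [h0, h1, h2]
          intro ⟨e1, e2, e3⟩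
          exact hc ⟨by injection e1, by injection e2, by injection e3⟩)]
        have hdrop1 : b.drop (i + 1).toNat = c2 :: c3 :: rest := by
          rw [show (i + 1).toNat = i.toNat + 1 from by omega, ← List.drop_drop, hdrop]
          rfl
        rw [ih (i + 1) c (by omega) (by omega), hdrop1, hdrop]
        rw [pvCnt, if_neg hc]
    · rw [dif_neg hlt]
      rw [pvCnt_short _ (by simp; omega)]
      ring

-- ===== VERDICT (by name: the statement is the Claim_ definition above) =====
theorem beautiful_binary_string_1_spec : Claim_equal_beautiful_binary_string_1 := by
  intro b _
  unfold Spec_beautiful_binary_string_1 beautiful_binary_string_1 beautiful_binary_string_1_alt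
  have hA := pvAGo_eq b.toList b.toList.length 0 0 (by omega) (by omega)
  rw [zero_add] at hA
  rw [show (0 : Int).toNat = 0 from rfl, List.drop_zero] at hA
  rw [hA]
  have hlen : (PySem.Str.len (PySem.Str.replace b "010" "01") : Int)
      = ((PySem.Chars.replace b.toList "010".toList "01".toList).length : Int) := by
    rw [show PySem.Str.len (PySem.Str.replace b "010" "01")
        = (PySem.Str.replace b "010" "01").toList.length from by
      simp [PySem.Str.len]]
    rw [PySem.Str.toList_replace]
  rw [hlen]
  rw [show ("010".toList : List Char) = ['0', '1', '0'] from by decide,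
    show ("01".toList : List Char) = ['0', '1'] from by decide]
  unfold PySem.Chars.replace
  rw [if_neg (by simp)]
  rw [go_eq b.toList.length b.toList [] le_rfl]
  rw [show (PySem.Str.len b : Int) = (b.toList.length : Int) from by
    simp [PySem.Str.len]]
  simp only [List.reverse_nil, List.nil_append]
  have := pvRep_length b.toList
  omega
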